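-- pv_equiv track=rewrite | github.com/KampfFlummix/NexusAI | ai_core.py | extract_relevant_code_section
-- ===== SOURCE A (Python) =====
-- def extract_relevant_code_section(content, start_position):
--     """Extrahiert relevanten Code-Abschnitt ab der Insertion-Position"""
--     # Findet das Ende des aktuellen Code-Blocks
--     lines = content[start_position:].split('\n')
--     code_section = []
--
--     for line in lines:
--         if line.strip() and not line.strip().startswith('/*') and not line.strip().startswith('//'):
--             code_section.append(line)
--         elif len(code_section) > 0:
--             break
--
--     return '\n'.join(code_section)
-- ===== SOURCE B (Python) =====
-- def _is_code(line):
--     s = line.strip()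
--     return bool(s) and not s.startswith('/*') and not s.startswith('//')
--
--
-- def extract_relevant_code_section(content, start_position):
--     lines = content[start_position:].split('\n')
--     flags = [_is_code(l) for l in lines]
--     if True not in flags:
--         return ''
--     i = flags.index(True)
--     tail = flags[i:]
--     j = tail.index(False) if False in tail else len(tail)
--     return '\n'.join(lines[i:i + j])
-- ===== Notes on version B (the rewrite author's own statement) =====
-- stated objective: alternative
-- what changed: Replaced A's single stateful collect-and-break loop by a staged computation: precompute a boolean is-code flag table, locate the block boundaries with list.index (first True, then first False after it), and return one slice lines[i:i+j] joined at the end.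
import Mathlib
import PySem

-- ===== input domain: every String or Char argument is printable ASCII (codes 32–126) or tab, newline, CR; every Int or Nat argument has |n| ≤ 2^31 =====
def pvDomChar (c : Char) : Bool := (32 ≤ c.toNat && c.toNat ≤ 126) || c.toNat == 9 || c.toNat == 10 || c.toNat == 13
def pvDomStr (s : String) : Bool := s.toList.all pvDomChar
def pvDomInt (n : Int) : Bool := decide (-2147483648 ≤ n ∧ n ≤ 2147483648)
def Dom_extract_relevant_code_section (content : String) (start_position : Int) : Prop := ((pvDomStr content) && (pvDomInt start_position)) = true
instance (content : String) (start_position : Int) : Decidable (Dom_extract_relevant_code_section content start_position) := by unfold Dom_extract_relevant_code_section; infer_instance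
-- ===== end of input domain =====

-- ===== PORT A =====
-- B (below) replaces A's single stateful collect-then-break loop by a flag table + index arithmetic + one slice; objective: alternative. Return values proved equal.
def pvIsCodeA (line : String) : Bool :=
  PySem.Str.strip line ≠ "" &&
    !PySem.Str.startswith (PySem.Str.strip line) "/*" &&
    !PySem.Str.startswith (PySem.Str.strip line) "//"

-- the for-loop of A, with its accumulator `code_section` and early break
def pvLoopA : List String → List String → List String
  | acc, [] => acc
  | acc, l :: rest =>
    if pvIsCodeA l then pvLoopA (acc ++ [l]) rest
    else if acc.length > 0 then acc
    else pvLoopA acc rest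

def extract_relevant_code_section (content : String) (start_position : Int) : String :=
  let lines : List String := (PySem.Str.split? (PySem.Str.slice content (some start_position) none) "\n").getD []  -- sep "\n" ≠ "": split? is some
  PySem.Str.join "\n" (pvLoopA [] lines)

-- ===== PORT B =====
def pvIsCodeB (line : String) : Bool :=
  let s := PySem.Str.strip line
  s ≠ "" && !PySem.Str.startswith s "/*" && !PySem.Str.startswith s "//"

def extract_relevant_code_section_alt (content : String) (start_position : Int) : String :=
  let lines : List String := (PySem.Str.split? (PySem.Str.slice content (some start_position) none) "\n").getD []  -- sep "\n" ≠ "": split? is some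
  let flags : List Bool := lines.map pvIsCodeB
  if flags.contains true = false then ""            -- if True not in flags: return ''
  else
    let i : Nat := (PySem.List.index? flags true).getD 0     -- True ∈ flags, so index? is some
    let tail : List Bool := PySem.List.slice flags (some (i : Int)) none   -- flags[i:]
    let j : Nat := if tail.contains false then (PySem.List.index? tail false).getD 0 else tail.length
    PySem.Str.join "\n" (PySem.List.slice lines (some (i : Int)) (some ((i : Int) + (j : Int))))  -- lines[i:i+j]

-- ===== PRECONDITION & SPEC =====
def Spec_extract_relevant_code_section (content : String) (start_position : Int) (out : String) : Prop := out = extract_relevant_code_section_alt content start_position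
instance (content : String) (start_position : Int) (out : String) : Decidable (Spec_extract_relevant_code_section content start_position out) := by unfold Spec_extract_relevant_code_section; infer_instance

-- ===== CLAIM (what is proved, stated in full; the proofs are below) =====
def Claim_equal_extract_relevant_code_section : Prop := ∀ (content : String) (start_position : Int), Dom_extract_relevant_code_section content start_position → Spec_extract_relevant_code_section content start_position (extract_relevant_code_section content start_position)

-- ===== LEMMAS AND PROOFS =====
theorem pvIsCode_eq : pvIsCodeA = pvIsCodeB := rfl

-- A's loop with nonempty accumulator just takes the maximal code prefix
theorem pvLoopA_nonempty (lines acc : List String) (h : acc ≠ []) :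
    pvLoopA acc lines = acc ++ lines.takeWhile pvIsCodeA := by
  induction lines generalizing acc with
  | nil => simp [pvLoopA]
  | cons l rest ih =>
    by_cases hc : pvIsCodeA l
    · simp [pvLoopA, hc, ih (acc ++ [l]) (by simp)]
    · have : acc.length > 0 := List.length_pos_iff.mpr h
      simp [pvLoopA, hc, this]

-- closed form of A's loop: skip non-code lines, then the maximal code prefix
theorem pvLoopA_eq (lines : List String) :
    pvLoopA [] lines = (lines.dropWhile (fun l => !pvIsCodeA l)).takeWhile pvIsCodeA := by
  induction lines with
  | nil => simp [pvLoopA]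
  | cons l rest ih =>
    by_cases hc : pvIsCodeA l
    · simp [pvLoopA, hc, pvLoopA_nonempty rest [l] (by simp)]
    · simp [pvLoopA, hc, ih]

-- B's outer index: dropping to the first true flag is dropWhile of the non-code prefix
theorem pv_drop_idx (lines : List String) (i : Nat)
    (h : PySem.List.index? (lines.map pvIsCodeB) true = some i) :
    lines.drop i = lines.dropWhile (fun l => !pvIsCodeB l) := by
  induction lines generalizing i with
  | nil => simp [PySem.List.index?] at h
  | cons l rest ih =>
    by_cases hc : pvIsCodeB l
    · rw [List.map_cons, hc, PySem.List.index?_cons_self] at h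
      cases h
      simp [hc]
    · rw [List.map_cons] at h
      rw [PySem.List.index?_cons_of_ne _ (show pvIsCodeB l ≠ true by simp [hc])] at h
      cases hi : PySem.List.index? (rest.map pvIsCodeB) true with
      | none => rw [hi, Option.map_none] at h; exact absurd h (by simp)
      | some i' =>
        rw [hi, Option.map_some, Option.some.injEq] at h
        subst h
        rw [List.drop_succ_cons, List.dropWhile_cons_of_pos (by simp [hc])]
        exact ih i' hi

-- B's inner index: taking up to the first false flag is takeWhile
theorem pv_take_idx (M : List String) :
    M.take (if (M.map pvIsCodeB).contains false then
              (PySem.List.index? (M.map pvIsCodeB) false).getD 0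
            else (M.map pvIsCodeB).length)
      = M.takeWhile pvIsCodeB := by
  induction M with
  | nil => simp
  | cons m rest ih =>
    by_cases hc : pvIsCodeB m
    · rw [List.map_cons, hc]
      rw [PySem.List.index?_cons_of_ne _ (show (true : Bool) ≠ false by decide)]
      have hcond : (true :: rest.map pvIsCodeB).contains false = (rest.map pvIsCodeB).contains false := by
        rw [List.contains_cons]; rfl
      rw [hcond, List.length_cons]
      by_cases hf : (rest.map pvIsCodeB).contains false
      · rcases Option.isSome_iff_exists.1
            ((PySem.List.index?_isSome_iff (rest.map pvIsCodeB) false).2 (by simpa using hf)) with ⟨j, hj⟩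
        rw [if_pos hf, hj, Option.map_some, Option.getD_some,
            List.take_succ_cons, List.takeWhile_cons_of_pos hc]
        rw [if_pos hf, hj, Option.getD_some] at ih
        rw [ih]
      · rw [if_neg hf, List.take_succ_cons, List.takeWhile_cons_of_pos hc]
        rw [if_neg hf] at ih
        rw [ih]
    · have hcf : pvIsCodeB m = false := by simpa using hc
      rw [List.map_cons, hcf, PySem.List.index?_cons_self]
      rw [if_pos (by simp), Option.getD_some, List.take_zero,
          List.takeWhile_cons_of_neg hc]

-- B's staged computation equals dropWhile/takeWhile, on any list of lines
theorem pv_phases_eq (lines : List String) :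
    (let flags : List Bool := lines.map pvIsCodeB
     if flags.contains true = false then ""
     else
       let i : Nat := (PySem.List.index? flags true).getD 0
       let tail : List Bool := PySem.List.slice flags (some (i : Int)) none
       let j : Nat := if tail.contains false then (PySem.List.index? tail false).getD 0 else tail.length
       PySem.Str.join "\n" (PySem.List.slice lines (some (i : Int)) (some ((i : Int) + (j : Int)))))
    = PySem.Str.join "\n" ((lines.dropWhile (fun l => !pvIsCodeB l)).takeWhile pvIsCodeB) := by
  by_cases ht : (lines.map pvIsCodeB).contains true
  · simp only [ht, Bool.true_eq_false, if_false]
    have hsome : (PySem.List.index? (lines.map pvIsCodeB) true).isSome :=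
      (PySem.List.index?_isSome_iff _ _).2 (by simpa using ht)
    rcases Option.isSome_iff_exists.1 hsome with ⟨i, hi⟩
    simp only [hi, Option.getD_some]
    rw [PySem.List.slice_from_natCast, PySem.List.slice_natCast_add]
    rw [← List.map_drop]
    rw [pv_take_idx (lines.drop i), pv_drop_idx lines i hi]
  · simp only [Bool.not_eq_true] at ht
    simp only [ht, if_true]
    have : lines.dropWhile (fun l => !pvIsCodeB l) = [] := by
      rw [List.dropWhile_eq_nil_iff]
      intro x hx
      have : pvIsCodeB x = false := by
        by_contra hpx
        have : (true : Bool) ∈ lines.map pvIsCodeB :=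
          List.mem_map.2 ⟨x, hx, by simpa using hpx⟩
        simp [List.contains_eq_mem, this] at ht
      simp [this]
    rw [this]
    rfl

-- ===== VERDICT (by name: the statement is the Claim_ definition above) =====
theorem extract_relevant_code_section_spec : Claim_equal_extract_relevant_code_section := by
  intro content start_position _
  unfold Spec_extract_relevant_code_section extract_relevant_code_section extract_relevant_code_section_alt
  rw [pv_phases_eq]
  show PySem.Str.join "\n" (pvLoopA [] _) = _
  rw [pvLoopA_eq, pvIsCode_eq]
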